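-- pv_equiv track=rewrite | github.com/jlcmoore/llms-as-therapists | utils.py | messages_alternate
-- ===== SOURCE A (Python) =====
-- def messages_alternate(messages):
--     """Returns true if the messages alternate and False otherwise. Ignores system messages"""
--     last = None
--     for m in messages:
--         if m["role"] == "system":
--             continue
--         if last and last == m["role"]:
--             return False
--         last = m["role"]
--     return True
-- ===== SOURCE B (Python) =====
-- def messages_alternate(messages):
--     """Returns true if the messages alternate and False otherwise. Ignores system messages"""
--     roles = [m["role"] for m in messages if m["role"] != "system"]
--     runs = []
--     for r in roles:
--         if runs and runs[-1][0] == r: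
--             runs[-1][1] += 1
--         else:
--             runs.append([r, 1])
--     return all(c == 1 for _, c in runs)
-- ===== Notes on version B (the rewrite author's own statement) =====
-- stated objective: alternative
-- what changed: Replaces A's stateful early-return loop with run-length encoding: extract non-system roles, group them into consecutive runs, and report alternation iff every run has length 1; Pre_ excludes messages without a 'role' key, which A sometimes tolerates by returning False before reaching them while B's full extraction pass raises KeyError.
-- intended difference: On inputs whose non-system role sequence has two consecutive empty-string roles and no consecutive pair of equal non-empty roles, A returns True because 'if last and ...' treats an empty-string role as falsy and never compares it, while B returns False, the intended verdict since two consecutive identical roles do not alternate. — e.g. on messages_alternate([[("role", "")], [("role", "")]]): A returns true, B returns false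
-- outside the precondition, e.g. on messages_alternate([{'role': 'a'}, {'role': 'a'}, {}]): A returns False, B raises KeyError
import Mathlib
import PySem

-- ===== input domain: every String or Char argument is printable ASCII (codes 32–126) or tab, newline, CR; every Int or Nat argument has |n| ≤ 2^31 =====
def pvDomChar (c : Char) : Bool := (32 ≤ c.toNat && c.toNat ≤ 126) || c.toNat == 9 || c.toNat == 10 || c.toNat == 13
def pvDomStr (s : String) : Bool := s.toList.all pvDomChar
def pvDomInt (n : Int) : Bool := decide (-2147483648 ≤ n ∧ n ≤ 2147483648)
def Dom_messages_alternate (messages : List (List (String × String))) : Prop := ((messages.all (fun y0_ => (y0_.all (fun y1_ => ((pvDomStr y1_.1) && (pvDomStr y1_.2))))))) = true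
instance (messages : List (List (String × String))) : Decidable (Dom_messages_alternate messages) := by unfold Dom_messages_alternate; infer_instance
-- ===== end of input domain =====

-- B re-implements the check by run-length encoding the non-system roles and requiring every run to have length 1 (alternative decomposition, same cost); B fixes A's empty-string-role blind spot (see D_); return value only, no mutation.

-- ===== PORT A =====
-- m["role"] as Python evaluates it: build the dict, look up "role" ("" never occurs inside Pre_, where the key is present)
def pvRole (m : List (String × String)) : String := (PySem.Dict.ofList m).getD "role" ""

-- the loop of A: 'last' starts as None; 'if last and last == m["role"]'
def pvLoopA : Option String → List (List (String × String)) → Bool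
  | _, [] => true
  | last, m :: rest =>
    let r := pvRole m
    if r = "system" then pvLoopA last rest
    else
      match last with
      | none => pvLoopA (some r) rest
      | some l => if (l != "") && (l == r) then false else pvLoopA (some r) rest

def messages_alternate (messages : List (List (String × String))) : Bool :=
  pvLoopA none messages

-- ===== PORT B =====
-- one step of B's run-building loop: 'if runs and runs[-1][0] == r: runs[-1][1] += 1 else: runs.append([r, 1])'
def pvRunStep (runs : List (String × Int)) (r : String) : List (String × Int) :=
  match runs.getLast? with
  | some (l, c) => if l = r then runs.dropLast ++ [(l, c + 1)] else runs ++ [(r, 1)]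
  | none => [(r, 1)]

def messages_alternate_alt (messages : List (List (String × String))) : Bool :=
  let roles := (messages.map pvRole).filter (fun r => r != "system")
  let runs := roles.foldl pvRunStep []
  runs.all (fun rc => rc.2 == 1)

-- ===== PRECONDITION & SPEC =====
-- Pre_ requires every message to carry a "role" key; A only reads keys lazily up to an early
-- False, so it excludes some inputs where A still returns False before reaching a keyless message.
def Pre_messages_alternate (messages : List (List (String × String))) : Prop :=
  ∀ m ∈ messages, (PySem.Dict.ofList m).contains "role" = true
instance (messages : List (List (String × String))) : Decidable (Pre_messages_alternate messages) := by unfold Pre_messages_alternate; infer_instance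
def pvWitness_messages_alternate : (List (List (String × String))) :=
  [[("role", "user")], [("role", "assistant")], [("role", "system")], [("role", "user")]]

-- On inputs whose non-system role sequence has two consecutive empty-string roles and no consecutive
-- pair of equal non-empty roles, A returns True ('if last and ...' treats an empty-string role as
-- falsy and never compares it) while B returns False, the intended verdict: identical consecutive
-- roles do not alternate.
def D_messages_alternate (messages : List (List (String × String))) : Prop :=
  let rs := (messages.filter (fun m => pvRole m ≠ "system")).map pvRole
  (∃ p ∈ rs.zip rs.tail, p.1 = p.2) ∧ ∀ p ∈ rs.zip rs.tail, p.1 = p.2 → p.1 = ""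
instance (messages : List (List (String × String))) : Decidable (D_messages_alternate messages) := by unfold D_messages_alternate; infer_instance

def Spec_messages_alternate (messages : List (List (String × String))) (out : Bool) : Prop := ¬ D_messages_alternate messages → out = messages_alternate_alt messages
instance (messages : List (List (String × String))) (out : Bool) : Decidable (Spec_messages_alternate messages out) := by unfold Spec_messages_alternate; infer_instance

def pvDiffWitness_messages_alternate : (List (List (String × String))) :=
  [[("role", "")], [("role", "")]]
def pvDiffWitnessOut_messages_alternate : Bool × Bool := (true, false)

-- ===== CLAIM (what is proved, stated in full; the proofs are below) =====
def Claim_unchanged_messages_alternate : Prop := ∀ (messages : List (List (String × String))), Dom_messages_alternate messages → Pre_messages_alternate messages → Spec_messages_alternate messages (messages_alternate messages)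
def Claim_changed_messages_alternate : Prop := Dom_messages_alternate (pvDiffWitness_messages_alternate) ∧ Pre_messages_alternate (pvDiffWitness_messages_alternate) ∧ D_messages_alternate (pvDiffWitness_messages_alternate) ∧ messages_alternate (pvDiffWitness_messages_alternate) = pvDiffWitnessOut_messages_alternate.1 ∧ messages_alternate_alt (pvDiffWitness_messages_alternate) = pvDiffWitnessOut_messages_alternate.2 ∧ pvDiffWitnessOut_messages_alternate.1 ≠ pvDiffWitnessOut_messages_alternate.2
def Claim_exact_messages_alternate : Prop := ∀ (messages : List (List (String × String))), Dom_messages_alternate messages → Pre_messages_alternate messages → D_messages_alternate messages → messages_alternate messages ≠ messages_alternate_alt messages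

-- ===== LEMMAS AND PROOFS =====
-- the filtered role list both ports traverse, and the fact that D_'s messages-first
-- filtering produces the same list
def pvRolesOf (messages : List (List (String × String))) : List String :=
  (messages.map pvRole).filter (fun r => r != "system")

theorem pvDRoles_eq (messages : List (List (String × String))) :
    (messages.filter (fun m => pvRole m ≠ "system")).map pvRole = pvRolesOf messages := by
  unfold pvRolesOf
  induction messages with
  | nil => rfl
  | cons m rest ih =>
    simp only [List.filter_cons, List.map_cons]
    by_cases hs : pvRole m = "system"
    · simpa [hs] using ih
    · simpa [hs] using ih

-- adjacency scan with A's non-empty guard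
def pvPairBad : List String → Bool
  | [] => false
  | [_] => false
  | a :: b :: rest => ((a != "") && (a == b)) || pvPairBad (b :: rest)

-- plain adjacency scan (what B's run-length condition amounts to)
def pvAnyEq : List String → Bool
  | [] => false
  | [_] => false
  | a :: b :: rest => (a == b) || pvAnyEq (b :: rest)

theorem pvLoopA_eq (msgs : List (List (String × String))) (last : Option String) :
    pvLoopA last msgs = !pvPairBad (last.toList ++ (msgs.map pvRole).filter (fun r => r != "system")) := by
  induction msgs generalizing last with
  | nil => cases last <;> rfl
  | cons m rest ih =>
    simp only [List.map_cons, List.filter_cons]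
    by_cases hs : pvRole m = "system"
    · have : (pvRole m != "system") = false := by simp [hs]
      rw [this]
      simp only [pvLoopA, if_pos hs]
      exact ih last
    · have hne : (pvRole m != "system") = true := by simp [hs]
      rw [hne]
      simp only [pvLoopA, if_neg hs]
      cases last with
      | none => simpa using ih (some (pvRole m))
      | some l =>
        simp only [Option.toList]
        by_cases hb : ((l != "") && (l == pvRole m)) = true
        · rw [if_pos hb]
          have : pvPairBad (l :: pvRole m :: (rest.map pvRole).filter (fun r => r != "system")) = true := by
            simp only [pvPairBad, hb, Bool.true_or]
          simp [this]
        · rw [if_neg hb]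
          rw [ih (some (pvRole m))]
          simp only [Bool.not_eq_true] at hb
          simp [pvPairBad, hb]

theorem pvRuns_all (roles : List String) (pre : List (String × Int)) (l : String) (c : Int) (hc : 1 ≤ c) :
    ((roles.foldl pvRunStep (pre ++ [(l, c)])).all (fun rc => rc.2 == 1))
      = ((pre ++ [(l, c)]).all (fun rc => rc.2 == 1) && !pvAnyEq (l :: roles)) := by
  induction roles generalizing pre l c with
  | nil => simp [pvAnyEq]
  | cons r rest ih =>
    simp only [List.foldl_cons]
    have hlast : (pre ++ [(l, c)]).getLast? = some (l, c) := by simp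
    by_cases h : l = r
    · have hstep : pvRunStep (pre ++ [(l, c)]) r = pre ++ [(l, c + 1)] := by
        simp [pvRunStep, h]
      rw [hstep, ih pre l (c + 1) (by omega)]
      have h1 : ((c + 1 : Int) == 1) = false := by simp; omega
      subst h
      simp [pvAnyEq, h1]
    · have hstep : pvRunStep (pre ++ [(l, c)]) r = (pre ++ [(l, c)]) ++ [(r, 1)] := by
        simp [pvRunStep, h]
      rw [hstep, ih (pre ++ [(l, c)]) r 1 le_rfl]
      have : (l == r) = false := by simp [h]
      simp [pvAnyEq, this, Bool.and_comm]

theorem pvAlt_eq (messages : List (List (String × String))) :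
    messages_alternate_alt messages = !pvAnyEq (pvRolesOf messages) := by
  unfold messages_alternate_alt pvRolesOf
  cases h : (messages.map pvRole).filter (fun r => r != "system") with
  | nil => rfl
  | cons r rest =>
    simp only [List.foldl_cons]
    have : pvRunStep [] r = [] ++ [(r, 1)] := rfl
    rw [this, pvRuns_all rest [] r 1 le_rfl]
    simp

theorem pvA_eq (messages : List (List (String × String))) :
    messages_alternate messages = !pvPairBad (pvRolesOf messages) := by
  unfold messages_alternate pvRolesOf
  rw [pvLoopA_eq]
  rfl

theorem pvAnyEq_iff (rs : List String) :
    pvAnyEq rs = true ↔ ∃ p ∈ rs.zip rs.tail, p.1 = p.2 := by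
  induction rs with
  | nil => simp [pvAnyEq]
  | cons a rest ih =>
    cases rest with
    | nil => simp [pvAnyEq]
    | cons b rest' =>
      simp only [pvAnyEq, Bool.or_eq_true, beq_iff_eq, List.tail_cons, List.zip_cons_cons,
        List.mem_cons]
      rw [ih]
      constructor
      · rintro (h | ⟨p, hp, he⟩)
        · exact ⟨(a, b), Or.inl rfl, h⟩
        · exact ⟨p, Or.inr (by simpa using hp), he⟩
      · rintro ⟨p, (rfl | hp), he⟩
        · exact Or.inl he
        · exact Or.inr ⟨p, by simpa using hp, he⟩

theorem pvPairBad_iff (rs : List String) :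
    pvPairBad rs = true ↔ ∃ p ∈ rs.zip rs.tail, p.1 ≠ "" ∧ p.1 = p.2 := by
  induction rs with
  | nil => simp [pvPairBad]
  | cons a rest ih =>
    cases rest with
    | nil => simp [pvPairBad]
    | cons b rest' =>
      simp only [pvPairBad, Bool.or_eq_true, Bool.and_eq_true, bne_iff_ne, beq_iff_eq,
        List.tail_cons, List.zip_cons_cons, List.mem_cons]
      rw [ih]
      constructor
      · rintro (⟨hne, he⟩ | ⟨p, hp, hc⟩)
        · exact ⟨(a, b), Or.inl rfl, hne, he⟩
        · exact ⟨p, Or.inr (by simpa using hp), hc⟩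
      · rintro ⟨p, (rfl | hp), hc⟩
        · exact Or.inl hc
        · exact Or.inr ⟨p, by simpa using hp, hc⟩

-- ===== VERDICT (by name: the statements are the Claim_ definitions above) =====
theorem messages_alternate_spec : Claim_unchanged_messages_alternate := by
  intro messages _ _ hnd
  rw [pvA_eq, pvAlt_eq]
  unfold D_messages_alternate at hnd
  rw [pvDRoles_eq] at hnd
  simp only [] at hnd
  push Not at hnd
  congr 1
  by_cases hb : pvPairBad (pvRolesOf messages) = true
  · rw [hb]
    obtain ⟨p, hp, _, he⟩ := (pvPairBad_iff _).mp hb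
    exact ((pvAnyEq_iff _).mpr ⟨p, hp, he⟩).symm
  · rw [Bool.not_eq_true] at hb
    rw [hb]
    by_cases ha : pvAnyEq (pvRolesOf messages) = true
    · obtain ⟨p, hp, he⟩ := (pvAnyEq_iff _).mp ha
      obtain ⟨q, hq, heq, hemp⟩ := hnd ⟨p, hp, he⟩
      exact absurd ((pvPairBad_iff _).mpr ⟨q, hq, hemp, heq⟩) (by simp [hb])
    · rw [Bool.not_eq_true] at ha; rw [ha]

theorem messages_alternate_changed : Claim_changed_messages_alternate := by
  unfold Claim_changed_messages_alternate; decide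

theorem messages_alternate_tight : Claim_exact_messages_alternate := by
  intro messages _ _ hd
  unfold D_messages_alternate at hd
  rw [pvDRoles_eq] at hd
  obtain ⟨⟨p, hp, he⟩, hall⟩ := hd
  rw [pvA_eq, pvAlt_eq]
  have ha : pvAnyEq (pvRolesOf messages) = true := (pvAnyEq_iff _).mpr ⟨p, hp, he⟩
  have hb : pvPairBad (pvRolesOf messages) = false := by
    by_contra h
    rw [Bool.not_eq_false, pvPairBad_iff] at h
    obtain ⟨q, hq, hne, heq⟩ := h
    exact hne (hall q hq heq)
  simp [ha, hb]
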